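-- pv_equiv track=rewrite | github.com/nathandjanica/test | test.py | generate_tile_coordinates
-- ===== SOURCE A (Python) =====
-- def generate_tile_coordinates(v_lines, h_lines):
--     tiles = []
--     for i in range(len(h_lines) - 1):
--         for j in range(len(v_lines) - 1):
--             x = v_lines[j] + 1
--             y = h_lines[i] + 1
--             w = v_lines[j + 1] - v_lines[j] - 1
--             h = h_lines[i + 1] - h_lines[i] - 1
--             if 10 < w < 100 and 10 < h < 100:
--                 tiles.append((x, y, w, h))
--     return tiles
-- ===== SOURCE B (Python) =====
-- def _segments(lines):
--     # (start+1, gap) for each adjacent pair, keeping only gaps strictly between 10 and 100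
--     return [(a + 1, b - a - 1) for a, b in zip(lines, lines[1:]) if 10 < b - a - 1 < 100]
--
--
-- def generate_tile_coordinates(v_lines, h_lines):
--     cols = _segments(v_lines)
--     rows = _segments(h_lines)
--     return [(x, y, w, h) for (y, h) in rows for (x, w) in cols]
-- ===== Notes on version B (the rewrite author's own statement) =====
-- stated objective: faster
-- what changed: Instead of A's nested index loops re-testing the width condition n*m times, B builds the filtered column segments and row segments once each (one pass over adjacent pairs per list, exploiting that the w-filter depends only on the column and the h-filter only on the row) and returns their cross product.
import Mathlib
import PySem

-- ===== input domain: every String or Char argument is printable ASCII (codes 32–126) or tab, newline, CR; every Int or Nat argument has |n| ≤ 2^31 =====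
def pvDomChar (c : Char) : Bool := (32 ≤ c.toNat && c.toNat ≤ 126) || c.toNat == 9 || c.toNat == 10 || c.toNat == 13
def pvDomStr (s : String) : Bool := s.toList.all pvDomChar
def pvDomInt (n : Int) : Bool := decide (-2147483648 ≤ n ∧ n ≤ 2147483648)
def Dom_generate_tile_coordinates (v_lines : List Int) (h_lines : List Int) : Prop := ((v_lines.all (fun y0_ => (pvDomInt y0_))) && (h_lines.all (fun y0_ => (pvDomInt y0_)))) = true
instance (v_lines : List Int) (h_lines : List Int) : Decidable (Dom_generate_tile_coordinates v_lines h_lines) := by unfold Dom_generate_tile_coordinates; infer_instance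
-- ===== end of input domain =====

-- B replaces A's nested index loops (which re-test the width condition for every row)
-- by one filtered pass over each list's adjacent pairs followed by a cross product.

-- ===== PORT A =====
def generate_tile_coordinates (v_lines : List Int) (h_lines : List Int) : List (Int × Int × Int × Int) :=
  (PySem.List.pyRange 0 ((h_lines.length : Int) - 1) 1).foldl (fun tiles i =>
    (PySem.List.pyRange 0 ((v_lines.length : Int) - 1) 1).foldl (fun tiles j =>
      let x := PySem.List.pyGetD v_lines j 0 + 1
      let y := PySem.List.pyGetD h_lines i 0 + 1
      let w := PySem.List.pyGetD v_lines (j + 1) 0 - PySem.List.pyGetD v_lines j 0 - 1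
      let h := PySem.List.pyGetD h_lines (i + 1) 0 - PySem.List.pyGetD h_lines i 0 - 1
      if 10 < w ∧ w < 100 ∧ 10 < h ∧ h < 100 then tiles ++ [(x, y, w, h)] else tiles)
      tiles)
    []

-- ===== PORT B =====
-- helper `_segments` of Source B: filtered comprehension over zip(lines, lines[1:])
def pvSegments (lines : List Int) : List (Int × Int) :=
  ((lines.zip (lines.drop 1)).filter
      (fun ab => decide (10 < ab.2 - ab.1 - 1 ∧ ab.2 - ab.1 - 1 < 100))).map
    (fun ab => (ab.1 + 1, ab.2 - ab.1 - 1))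

def generate_tile_coordinates_alt (v_lines : List Int) (h_lines : List Int) : List (Int × Int × Int × Int) :=
  let cols := pvSegments v_lines
  let rows := pvSegments h_lines
  rows.flatMap (fun yh => cols.map (fun xw => (xw.1, yh.1, xw.2, yh.2)))


-- ===== PRECONDITION & SPEC =====
def Spec_generate_tile_coordinates (v_lines : List Int) (h_lines : List Int) (out : List (Int × Int × Int × Int)) : Prop := out = generate_tile_coordinates_alt v_lines h_lines
instance (v_lines : List Int) (h_lines : List Int) (out : List (Int × Int × Int × Int)) : Decidable (Spec_generate_tile_coordinates v_lines h_lines out) := by unfold Spec_generate_tile_coordinates; infer_instance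

-- ===== CLAIM (what is proved, stated in full; the proofs are below) =====
def Claim_equal_generate_tile_coordinates : Prop := ∀ (v_lines : List Int) (h_lines : List Int), Dom_generate_tile_coordinates v_lines h_lines → Spec_generate_tile_coordinates v_lines h_lines (generate_tile_coordinates v_lines h_lines)

-- ===== LEMMAS AND PROOFS =====

theorem pv_range_pairs (l : List Int) :
    (PySem.List.pyRange 0 ((l.length : Int) - 1) 1).map
        (fun j => (PySem.List.pyGetD l j 0, PySem.List.pyGetD l (j + 1) 0))
      = l.zip (l.drop 1) := by
  apply List.ext_getElem
  · simp [PySem.List.length_pyRange_one]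
  · intro i h1 h2
    have hi : i < l.length - 1 := by
      simp [PySem.List.length_pyRange_one] at h1; omega
    simp [PySem.List.getElem_pyRange_one, List.getElem_zip]
    constructor
    · rw [List.getElem?_eq_getElem (by omega)]; rfl
    · rw [show ((i:Int) + 1) = (((i+1):Nat):Int) by push_cast; ring,
          PySem.List.pyGetD_natCast, List.getD_eq_getElem _ _ (by omega)]

theorem pv_flatMap_ite {α β : Type} (l : List α) (p : α → Prop) [DecidablePred p]
    (g : α → List β) :
    l.flatMap (fun x => if p x then g x else []) = (l.filter (fun x => decide (p x))).flatMap g := by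
  induction l with
  | nil => rfl
  | cons a t ih => by_cases h : p a <;> simp [h, ih]

theorem pv_main (vl hl : List Int) :
    generate_tile_coordinates vl hl = generate_tile_coordinates_alt vl hl := by
  unfold generate_tile_coordinates generate_tile_coordinates_alt pvSegments
  have hinner : ∀ (tiles : List (Int × Int × Int × Int)) (i : Int),
      List.foldl (fun tiles j =>
        let x := PySem.List.pyGetD vl j 0 + 1
        let y := PySem.List.pyGetD hl i 0 + 1
        let w := PySem.List.pyGetD vl (j + 1) 0 - PySem.List.pyGetD vl j 0 - 1
        let h := PySem.List.pyGetD hl (i + 1) 0 - PySem.List.pyGetD hl i 0 - 1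
        if 10 < w ∧ w < 100 ∧ 10 < h ∧ h < 100 then tiles ++ [(x, y, w, h)] else tiles)
        tiles (PySem.List.pyRange 0 ((vl.length : Int) - 1) 1)
      = tiles ++ ((PySem.List.pyRange 0 ((vl.length : Int) - 1) 1).filter
          (fun j => decide (10 < PySem.List.pyGetD vl (j + 1) 0 - PySem.List.pyGetD vl j 0 - 1 ∧
            PySem.List.pyGetD vl (j + 1) 0 - PySem.List.pyGetD vl j 0 - 1 < 100 ∧
            10 < PySem.List.pyGetD hl (i + 1) 0 - PySem.List.pyGetD hl i 0 - 1 ∧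
            PySem.List.pyGetD hl (i + 1) 0 - PySem.List.pyGetD hl i 0 - 1 < 100))).map
          (fun j => (PySem.List.pyGetD vl j 0 + 1, PySem.List.pyGetD hl i 0 + 1,
            PySem.List.pyGetD vl (j + 1) 0 - PySem.List.pyGetD vl j 0 - 1,
            PySem.List.pyGetD hl (i + 1) 0 - PySem.List.pyGetD hl i 0 - 1)) :=
    fun tiles i => PySem.List.foldl_append_ite _ _ _ _
  simp only [hinner]
  rw [PySem.List.foldl_append_eq_flatMap, List.nil_append]
  -- convert the inner index filter/map to the zipped-pairs form, per outer index i
  have hv : ∀ (q : Int × Int),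
      ((PySem.List.pyRange 0 ((vl.length : Int) - 1) 1).filter
          (fun j => decide (10 < PySem.List.pyGetD vl (j + 1) 0 - PySem.List.pyGetD vl j 0 - 1 ∧
            PySem.List.pyGetD vl (j + 1) 0 - PySem.List.pyGetD vl j 0 - 1 < 100 ∧
            10 < q.2 - q.1 - 1 ∧ q.2 - q.1 - 1 < 100))).map
          (fun j => (PySem.List.pyGetD vl j 0 + 1, q.1 + 1,
            PySem.List.pyGetD vl (j + 1) 0 - PySem.List.pyGetD vl j 0 - 1, q.2 - q.1 - 1))
      = ((vl.zip (vl.drop 1)).filter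
          (fun ab => decide (10 < ab.2 - ab.1 - 1 ∧ ab.2 - ab.1 - 1 < 100 ∧
            10 < q.2 - q.1 - 1 ∧ q.2 - q.1 - 1 < 100))).map
          (fun ab => (ab.1 + 1, q.1 + 1, ab.2 - ab.1 - 1, q.2 - q.1 - 1)) := by
    intro q
    rw [← pv_range_pairs vl, List.filter_map, List.map_map]
    rfl
  -- convert the outer index flatMap to the zipped-pairs form
  have hh : (PySem.List.pyRange 0 ((hl.length : Int) - 1) 1).flatMap (fun i =>
      ((PySem.List.pyRange 0 ((vl.length : Int) - 1) 1).filter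
          (fun j => decide (10 < PySem.List.pyGetD vl (j + 1) 0 - PySem.List.pyGetD vl j 0 - 1 ∧
            PySem.List.pyGetD vl (j + 1) 0 - PySem.List.pyGetD vl j 0 - 1 < 100 ∧
            10 < PySem.List.pyGetD hl (i + 1) 0 - PySem.List.pyGetD hl i 0 - 1 ∧
            PySem.List.pyGetD hl (i + 1) 0 - PySem.List.pyGetD hl i 0 - 1 < 100))).map
          (fun j => (PySem.List.pyGetD vl j 0 + 1, PySem.List.pyGetD hl i 0 + 1,
            PySem.List.pyGetD vl (j + 1) 0 - PySem.List.pyGetD vl j 0 - 1,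
            PySem.List.pyGetD hl (i + 1) 0 - PySem.List.pyGetD hl i 0 - 1)))
    = (hl.zip (hl.drop 1)).flatMap (fun q =>
      ((PySem.List.pyRange 0 ((vl.length : Int) - 1) 1).filter
          (fun j => decide (10 < PySem.List.pyGetD vl (j + 1) 0 - PySem.List.pyGetD vl j 0 - 1 ∧
            PySem.List.pyGetD vl (j + 1) 0 - PySem.List.pyGetD vl j 0 - 1 < 100 ∧
            10 < q.2 - q.1 - 1 ∧ q.2 - q.1 - 1 < 100))).map
          (fun j => (PySem.List.pyGetD vl j 0 + 1, q.1 + 1,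
            PySem.List.pyGetD vl (j + 1) 0 - PySem.List.pyGetD vl j 0 - 1, q.2 - q.1 - 1))) := by
    rw [← pv_range_pairs hl, List.flatMap_map]
  rw [hh]
  simp only [hv]
  -- now transform B's side: rows.flatMap = zipH.flatMap with an if
  rw [List.flatMap_map, ← pv_flatMap_ite]
  apply List.flatMap_congr
  intro q _
  by_cases hq : 10 < q.2 - q.1 - 1 ∧ q.2 - q.1 - 1 < 100
  · rw [if_pos hq, List.map_map]
    congr 1
    apply List.filter_congr
    intro ab _
    simp [hq.1, hq.2]
  · rw [if_neg hq]
    simp only [List.map_eq_nil_iff, List.filter_eq_nil_iff]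
    intro ab _
    simp only [decide_eq_true_eq]
    tauto

-- ===== VERDICT (by name: the statement is the Claim_ definition above) =====
theorem generate_tile_coordinates_spec : Claim_equal_generate_tile_coordinates :=
  fun v_lines h_lines _ => pv_main v_lines h_lines
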